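-- pv_equiv track=rewrite | github.com/FastLED/FastLED | ci/compile_pch.py | _find_depfile_separator
-- ===== SOURCE A (Python) =====
-- def _find_depfile_separator(content: str) -> int:
--     """Find the index of the target:dependency separator colon in depfile content.
--
--     On Windows, paths contain drive-letter colons (e.g. ``C:\\path``).  A drive
--     letter colon is a single alpha character immediately before the colon, at
--     the start of a path token (position 0, or preceded by a non-alphanumeric
--     such as a space).  We skip those and return the first ``": "`` that is NOT
--     a drive-letter colon.
--
--     Returns the index of the ``':'`` character, or ``-1`` if not found.
--     """
--     idx = 0
--     while True:
--         space_idx = content.find(": ", idx)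
--         if space_idx == -1:
--             return -1
--
--         # A Windows drive letter looks like  X:  where X is a single alpha
--         # character at the start of a token (pos 0 or preceded by whitespace /
--         # non-alphanumeric).
--         if space_idx > 0:
--             char_before = content[space_idx - 1]
--             if char_before.isalpha() and (
--                 space_idx == 1 or not content[space_idx - 2].isalnum()
--             ):
--                 # Looks like a drive letter — skip it.
--                 idx = space_idx + 1
--                 continue
--
--         return space_idx
-- ===== SOURCE B (Python) =====
-- def _find_depfile_separator(content: str) -> int:
--     """One forward pass with a two-character sliding state instead of repeated
--     find()/skip bookkeeping: at each ':'+' ' pair decide directly from the two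
--     preceding characters whether it is a drive-letter colon."""
--     p1 = p2 = ''
--     for i, (c, nxt) in enumerate(zip(content, content[1:])):
--         if c == ':' and nxt == ' ' and not (p1.isalpha() and not p2.isalnum()):
--             return i
--         p2, p1 = p1, c
--     return -1
-- ===== Notes on version B (the rewrite author's own statement) =====
-- stated objective: alternative
-- what changed: A's while-loop of repeated str.find calls for the colon-space pair with skip/continue index bookkeeping and backward indexing at i-1/i-2 is replaced by a single forward pass over adjacent character pairs that carries the previous two characters as loop state, deciding each candidate colon on the spot.
import Mathlib
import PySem

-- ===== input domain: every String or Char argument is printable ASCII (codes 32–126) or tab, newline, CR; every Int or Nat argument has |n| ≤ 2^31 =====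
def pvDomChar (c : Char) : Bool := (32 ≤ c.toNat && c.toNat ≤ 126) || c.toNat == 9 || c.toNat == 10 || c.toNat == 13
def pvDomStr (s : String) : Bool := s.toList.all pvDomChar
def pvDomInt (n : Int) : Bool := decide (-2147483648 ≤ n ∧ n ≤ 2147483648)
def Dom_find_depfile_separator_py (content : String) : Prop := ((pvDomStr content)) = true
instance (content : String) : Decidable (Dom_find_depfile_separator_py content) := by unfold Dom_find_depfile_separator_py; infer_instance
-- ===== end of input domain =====

-- B replaces A's repeated find()/skip while-loop by a single forward pass that
-- carries the previous two characters as state (objective: alternative, same cost).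

-- ===== PORT A =====
-- A's while-loop: look for ": " from idx; when the colon looks like a drive
-- letter, skip it (idx := space_idx + 1), else return space_idx. The `hidx`
-- argument only carries the bound needed for termination (idx strictly grows
-- and stays ≤ len(content)); it adds no computation.
def findLoopA (s : List Char) (idx : Nat) (hidx : idx ≤ s.length) : Int :=
  let sp := PySem.Chars.findFrom s [':', ' '] (idx : Int) none
  if hsp : sp = -1 then -1
  else
    have hspec := PySem.Chars.findFrom_natCast_spec s [':', ' '] idx hidx hsp
    let p := sp.toNat
    have hple : p + 2 ≤ s.length := by
      have := hspec.2.1.length_le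
      simp [List.length_drop] at this
      omega
    if 0 < p then
      -- content[space_idx - 1] / content[space_idx - 2]: Python never raises
      -- here (space_idx ≥ 1, and [-2] is read only behind `space_idx == 1 or`,
      -- whose port below keeps the same disjunction), so pyGetD is exact
      if PySem.Chars.isalpha (PySem.List.pyGetD s ((p : Int) - 1) ' ') = true ∧
          (p = 1 ∨ PySem.Chars.isalnum (PySem.List.pyGetD s ((p : Int) - 2) ' ') = false) then
        findLoopA s (p + 1) (by omega)
      else sp
    else sp
termination_by s.length - idx
decreasing_by
  have : (idx : Int) ≤ sp := hspec.1
  omega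

def find_depfile_separator_py (content : String) : Int :=
  findLoopA content.toList 0 (by omega)

-- ===== PORT B =====
def optAlpha (c? : Option Char) : Bool :=
  match c? with
  | none => false      -- ''.isalpha() is False
  | some c => PySem.Chars.isalpha c

def optAlnum (c? : Option Char) : Bool :=
  match c? with
  | none => false      -- ''.isalnum() is False
  | some c => PySem.Chars.isalnum c

-- the `for i, (c, nxt) in enumerate(zip(content, content[1:]))` loop of Source B
-- with its early return; p1, p2 hold the previous and previous-previous character
def altGo (pairs : List (Char × Char)) (i : Nat) (p1 p2 : Option Char) : Int :=
  match pairs with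
  | [] => -1
  | (c, nxt) :: rest =>
    if c = ':' ∧ nxt = ' ' ∧ ¬(optAlpha p1 = true ∧ optAlnum p2 = false) then (i : Int)
    else altGo rest (i + 1) (some c) p1

def find_depfile_separator_py_alt (content : String) : Int :=
  let cs := content.toList
  altGo (cs.zip cs.tail) 0 none none

-- ===== PRECONDITION & SPEC =====
def Spec_find_depfile_separator_py (content : String) (out : Int) : Prop := out = find_depfile_separator_py_alt content
instance (content : String) (out : Int) : Decidable (Spec_find_depfile_separator_py content out) := by unfold Spec_find_depfile_separator_py; infer_instance

-- ===== CLAIM (what is proved, stated in full; the proofs are below) =====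
def Claim_equal_find_depfile_separator_py : Prop := ∀ (content : String), Dom_find_depfile_separator_py content → Spec_find_depfile_separator_py content (find_depfile_separator_py content)

-- ===== LEMMAS AND PROOFS =====

-- "the colon at i is a drive-letter colon" (the skip condition, on plain Nat indices)
def driveAt (s : List Char) (i : Nat) : Bool :=
  decide (0 < i) && PySem.Chars.isalpha (s.getD (i - 1) ' ') &&
    (decide (i = 1) || !PySem.Chars.isalnum (s.getD (i - 2) ' '))

-- "i is the separator both programs look for"
def sepOk (s : List Char) (i : Nat) : Bool :=
  decide ([':', ' '] <+: s.drop i) && !driveAt s i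

-- first index ≥ idx with sepOk, as an Int; -1 if none
def firstOk (s : List Char) (idx : Nat) : Int :=
  match (List.range' idx (s.length - idx)).find? (fun j => sepOk s j) with
  | some j => (j : Int)
  | none => -1

lemma firstOk_stop (s : List Char) (idx : Nat) (h : s.length ≤ idx) : firstOk s idx = -1 := by
  unfold firstOk
  have : s.length - idx = 0 := by omega
  simp [this]

lemma firstOk_step (s : List Char) (idx : Nat) (h : idx < s.length) :
    firstOk s idx = if sepOk s idx then (idx : Int) else firstOk s (idx + 1) := by
  unfold firstOk
  have hn : s.length - idx = (s.length - (idx + 1)) + 1 := by omega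
  rw [hn, List.range'_succ, List.find?_cons]
  by_cases hok : sepOk s idx = true <;> simp [hok]

lemma firstOk_skip (s : List Char) (idx t : Nat) (hle : idx ≤ t)
    (hno : ∀ j, idx ≤ j → j < t → sepOk s j = false) : firstOk s idx = firstOk s t := by
  induction t with
  | zero =>
    have : idx = 0 := by omega
    simp [this]
  | succ t ih =>
    rcases Nat.lt_or_ge idx (t + 1) with hlt | hge
    · have hidxt : idx ≤ t := by omega
      rw [ih hidxt (fun j h1 h2 => hno j h1 (by omega))]
      rcases Nat.lt_or_ge t s.length with hlen | hlen
      · rw [firstOk_step s t hlen, hno t hidxt (by omega)]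
        simp
      · rw [firstOk_stop s t hlen, firstOk_stop s (t + 1) (by omega)]
    · have : idx = t + 1 := by omega
      simp [this]

-- A's branch condition (on the Int-indexed pyGetD reads) is exactly driveAt
lemma driveAt_iff (s : List Char) (p : Nat) (hp0 : 0 < p) (hple : p + 1 ≤ s.length) :
    (PySem.Chars.isalpha (PySem.List.pyGetD s ((p : Int) - 1) ' ') = true ∧
      (p = 1 ∨ PySem.Chars.isalnum (PySem.List.pyGetD s ((p : Int) - 2) ' ') = false))
    ↔ driveAt s p = true := by
  have hgd1 : PySem.List.pyGetD s ((p : Int) - 1) ' ' = s.getD (p - 1) ' ' := by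
    have h1 : ((p : Int) - 1) = ((p - 1 : Nat) : Int) := by omega
    rw [h1, PySem.List.pyGetD_natCast]
  unfold driveAt
  simp only [Bool.and_eq_true, Bool.or_eq_true, decide_eq_true_eq, Bool.not_eq_true', hgd1]
  by_cases hp1 : p = 1
  · subst hp1
    simp
  · have hgd2 : PySem.List.pyGetD s ((p : Int) - 2) ' ' = s.getD (p - 2) ' ' := by
      have h2 : ((p : Int) - 2) = ((p - 2 : Nat) : Int) := by omega
      rw [h2, PySem.List.pyGetD_natCast]
    simp [hgd2, hp0, hp1]
    try tauto

-- the ": " prefix condition read off the two heads of the drop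
lemma prefix_drop_iff (s : List Char) (i : Nat) (c nxt : Char) (rest : List Char)
    (hdrop : s.drop i = c :: nxt :: rest) :
    ([':', ' '] <+: s.drop i) ↔ (c = ':' ∧ nxt = ' ') := by
  rw [hdrop]
  constructor
  · rintro ⟨t, ht⟩
    simp at ht
    exact ⟨ht.1.symm, ht.2.1.symm⟩
  · rintro ⟨h1, h2⟩
    exact ⟨rest, by simp [h1, h2]⟩

-- ===== A-side: findLoopA computes firstOk =====
lemma findLoopA_eq (s : List Char) :
    ∀ m idx (hidx : idx ≤ s.length), s.length - idx ≤ m →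
      findLoopA s idx hidx = firstOk s idx := by
  intro m
  induction m with
  | zero =>
    intro idx hidx hm
    have hlen : idx = s.length := by omega
    rw [findLoopA]
    have hsp : PySem.Chars.findFrom s [':', ' '] (idx : Int) none = -1 := by
      rw [PySem.Chars.findFrom_natCast_eq_neg_one_iff s [':', ' '] idx hidx]
      intro hinf
      have := hinf.length_le
      simp [hlen] at this
    rw [dif_pos hsp, firstOk_stop s idx (by omega)]
  | succ m ih =>
    intro idx hidx hm
    rw [findLoopA]
    by_cases hsp : PySem.Chars.findFrom s [':', ' '] (idx : Int) none = -1
    · -- no ": " at or after idx, hence no separator at all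
      rw [dif_pos hsp]
      rw [PySem.Chars.findFrom_natCast_eq_neg_one_iff s [':', ' '] idx hidx] at hsp
      have hno : ∀ j, idx ≤ j → j < s.length → sepOk s j = false := by
        intro j h1 h2
        unfold sepOk
        have hnp : ¬ ([':', ' '] <+: s.drop j) := by
          intro hpre
          apply hsp
          rw [← PySem.Chars.isIn_iff_infix, ← PySem.Chars.exists_prefix_drop_iff_isIn]
          refine ⟨j - idx, ?_⟩
          rw [List.drop_drop]
          have hj : idx + (j - idx) = j := by omega
          rw [hj]
          exact hpre
        simp [hnp]
      rw [firstOk_skip s idx s.length hidx hno, firstOk_stop s s.length (le_refl _)]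
    · rw [dif_neg hsp]
      have hspec := PySem.Chars.findFrom_natCast_spec s [':', ' '] idx hidx hsp
      set sp := PySem.Chars.findFrom s [':', ' '] (idx : Int) none with hspdef
      set p := sp.toNat with hpdef
      have hsppos : (idx : Int) ≤ sp := hspec.1
      have hspnat : sp = (p : Int) := by omega
      have hidxp : idx ≤ p := by omega
      have hple : p + 2 ≤ s.length := by
        have := hspec.2.1.length_le
        simp [List.length_drop] at this
        omega
      have hpre : [':', ' '] <+: s.drop p := hspec.2.1
      -- indices in [idx, p) carry no ": ", hence no separator
      have hskip : firstOk s idx = firstOk s p := by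
        apply firstOk_skip s idx p hidxp
        intro j h1 h2
        unfold sepOk
        have := hspec.2.2 j h1 h2
        simp [this]
      have hstep : firstOk s p = if sepOk s p then (p : Int) else firstOk s (p + 1) :=
        firstOk_step s p (by omega)
      by_cases hp0 : 0 < p
      · rw [if_pos hp0]
        by_cases hdr : driveAt s p = true
        · -- drive letter: A skips to p + 1, and sepOk p is false
          have hnot : ¬ sepOk s p = true := by simp [sepOk, hdr]
          rw [hskip, hstep, if_neg hnot,
            if_pos ((driveAt_iff s p hp0 (by omega)).mpr hdr)]
          exact ih (p + 1) (by omega) (by omega)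
        · -- genuine separator at p
          have hok : sepOk s p = true := by
            unfold sepOk
            simp [hpre, hdr]
          rw [hskip, hstep, if_pos hok,
            if_neg (fun hc => hdr ((driveAt_iff s p hp0 (by omega)).mp hc))]
          exact hspnat
      · -- p = 0: the colon is at the start, always a separator
        rw [if_neg hp0]
        have hp : p = 0 := by omega
        have hpre0 : [':', ' '] <+: s := by simpa [hp] using hpre
        have hok : sepOk s p = true := by
          unfold sepOk driveAt
          simp [hp, hpre0]
        rw [hskip, hstep, if_pos hok]
        exact hspnat

-- no separator can sit at the last position or beyond (": " needs two characters)
lemma sepOk_false_of_last (s : List Char) (j : Nat) (h : s.length ≤ j + 1) :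
    sepOk s j = false := by
  unfold sepOk
  have hnp : ¬ ([':', ' '] <+: s.drop j) := by
    intro hpre
    have := hpre.length_le
    simp [List.length_drop] at this
    omega
  simp [hnp]

-- ===== B-side: altGo computes firstOk =====
lemma altGo_eq (s : List Char) :
    ∀ m i, s.length - i ≤ m → i ≤ s.length →
      altGo ((s.drop i).zip (s.drop (i + 1))) i
        (if i = 0 then none else some (s.getD (i - 1) ' '))
        (if i ≤ 1 then none else some (s.getD (i - 2) ' ')) = firstOk s i := by
  intro m
  induction m with
  | zero =>
    intro i hm hi
    have hlen : i = s.length := by omega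
    have hdrop : s.drop i = [] := List.drop_eq_nil_of_le (by omega)
    rw [hdrop]
    simp [altGo, firstOk_stop s i (by omega)]
  | succ m ih =>
    intro i hm hi
    match hdrop : s.drop i with
    | [] =>
      have hlen : s.length ≤ i := by
        by_contra hc
        have := List.length_drop (l := s) (i := i)
        rw [hdrop] at this
        simp at this
        omega
      simp [altGo, firstOk_stop s i hlen]
    | [c] =>
      have hlen : s.length = i + 1 := by
        have := List.length_drop (l := s) (i := i)
        rw [hdrop] at this
        simp at this
        omega
      have hd1 : s.drop (i + 1) = [] := List.drop_eq_nil_of_le (by omega)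
      rw [hd1]
      simp only [List.zip_nil_right, altGo]
      rw [firstOk_step s i (by omega), sepOk_false_of_last s i (by omega)]
      simp [firstOk_stop s (i + 1) (by omega)]
    | c :: nxt :: rest =>
      have hlength : s.length - i = rest.length + 2 := by
        have := List.length_drop (l := s) (i := i)
        rw [hdrop] at this
        simp at this
        omega
      have hilt : i < s.length := by omega
      have hd1 : s.drop (i + 1) = nxt :: rest := by
        have : s.drop (i + 1) = (s.drop i).drop 1 := by
          rw [List.drop_drop]
        rw [this, hdrop]
        simp
      have hci : s[i]? = some c := by
        have h00 : (s.drop i)[0]? = some c := by rw [hdrop]; rfl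
        rw [List.getElem?_drop] at h00
        simpa using h00
      rw [hd1]
      simp only [List.zip_cons_cons, altGo]
      -- the loop condition is exactly sepOk s i
      have hcond :
          (c = ':' ∧ nxt = ' ' ∧
            ¬(optAlpha (if i = 0 then none else some (s.getD (i - 1) ' ')) = true ∧
              optAlnum (if i ≤ 1 then none else some (s.getD (i - 2) ' ')) = false))
          ↔ sepOk s i = true := by
        unfold sepOk driveAt
        rw [Bool.and_eq_true, decide_eq_true_eq, prefix_drop_iff s i c nxt rest hdrop]
        simp only [Bool.not_eq_true']
        by_cases h0 : i = 0
        · subst h0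
          simp [optAlpha]
        · by_cases h1 : i = 1
          · subst h1
            simp [optAlpha, optAlnum]
            tauto
          · have hne0 : ¬ (i = 0) := h0
            have hle1 : ¬ (i ≤ 1) := by omega
            have hpos : 0 < i := by omega
            simp [hne0, hle1, optAlpha, optAlnum, h1, hpos]
            try tauto
      by_cases hc : sepOk s i = true
      · rw [if_pos (hcond.mpr hc), firstOk_step s i hilt, if_pos hc]
      · rw [if_neg (fun h => hc (hcond.mp h)), firstOk_step s i hilt, if_neg hc]
        have hrw : ∀ p2,
            altGo ((nxt :: rest).zip rest) (i + 1) (some c) p2 =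
            altGo ((s.drop (i + 1)).zip (s.drop (i + 2))) (i + 1) (some c) p2 := by
          intro p2
          rw [hd1]
          have hd2 : s.drop (i + 2) = rest := by
            have : s.drop (i + 2) = (s.drop (i + 1)).drop 1 := by rw [List.drop_drop]
            rw [this, hd1]
            simp
          rw [hd2]
        rw [hrw]
        have hip1 : ¬ (i + 1 = 0) := by omega
        have hp1eq : (if i + 1 = 0 then none else some (s.getD (i + 1 - 1) ' ')) =
            some c := by
          simp [List.getD, hci]
        have hp2eq : (if i + 1 ≤ 1 then none else some (s.getD (i + 1 - 2) ' ')) =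
            (if i = 0 then none else some (s.getD (i - 1) ' ')) := by
          by_cases h0 : i = 0
          · simp [h0]
          · have h2 : ¬ (i + 1 ≤ 1) := by omega
            have h3 : i + 1 - 2 = i - 1 := by omega
            simp [h2, h0, h3]
        rw [← hp1eq, ← hp2eq]
        exact ih (i + 1) (by omega) (by omega)


-- ===== VERDICT (by name: the statement is the Claim_ definition above) =====
theorem find_depfile_separator_py_spec : Claim_equal_find_depfile_separator_py := by
  intro content _
  unfold Spec_find_depfile_separator_py find_depfile_separator_py find_depfile_separator_py_alt
  rw [findLoopA_eq content.toList content.toList.length 0 (by omega) (by omega)]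
  have h := altGo_eq content.toList content.toList.length 0 (by omega) (by omega)
  simp only [List.drop_zero, Nat.zero_add] at h
  show firstOk content.toList 0 = altGo (content.toList.zip content.toList.tail) 0 none none
  rw [show content.toList.tail = content.toList.drop 1 from List.drop_one.symm]
  simpa using h.symm
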